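-- pv_equiv track=rewrite | github.com/njnklab/CLAPs-algorithm | matching.py | _sets_to_bitmasks
-- ===== SOURCE A (Python) =====
-- def _sets_to_bitmasks(sets: list[set]) -> tuple[list[int], dict]:
--     """
--     Converts a list of node sets into bitmasks for efficient set operations.
--
--     It first creates a unified index mapping for all nodes present in the sets.
--
--     Parameters
--     ----------
--     sets : list[set]
--         A list of node sets.
--
--     Returns
--     -------
--     tuple[list[int], dict]
--         A tuple containing the list of bitmasks and the node-to-index mapping.
--     """
--     # 建立全集映射（两个层的节点并集即可——上层调用确保传同一映射）
--     all_nodes = set()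
--     for s in sets:
--         all_nodes |= set(s)
--     node2idx = {node: i for i, node in enumerate(sorted(all_nodes))}
--     bitmasks: list[int] = []
--     for s in sets:
--         mask = 0
--         for v in s:
--             mask |= (1 << node2idx[v])
--         bitmasks.append(mask)
--     return bitmasks, node2idx
-- ===== SOURCE B (Python) =====
-- def _sets_to_bitmasks(sets):
--     # Column-major: per node (in sorted order), set that node's bit in every
--     # set that contains it; node2idx is filled by the same enumeration.
--     all_nodes = set()
--     for s in sets:
--         all_nodes |= set(s)
--     node2idx = {}
--     bitmasks = [0] * len(sets)
--     for i, node in enumerate(sorted(all_nodes)):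
--         node2idx[node] = i
--         bit = 1 << i
--         for j, s in enumerate(sets):
--             if node in s:
--                 bitmasks[j] |= bit
--     return bitmasks, node2idx
-- ===== Notes on version B (the rewrite author's own statement) =====
-- stated objective: alternative
-- what changed: Transposed the mask-building pass: instead of one mask per set built by looking each of its nodes up in node2idx (row-major), B iterates the sorted node universe once and, per node, ORs that node's bit into every set containing it (column-major), building node2idx in the same single enumeration and needing no dictionary lookups.
import Mathlib
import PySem

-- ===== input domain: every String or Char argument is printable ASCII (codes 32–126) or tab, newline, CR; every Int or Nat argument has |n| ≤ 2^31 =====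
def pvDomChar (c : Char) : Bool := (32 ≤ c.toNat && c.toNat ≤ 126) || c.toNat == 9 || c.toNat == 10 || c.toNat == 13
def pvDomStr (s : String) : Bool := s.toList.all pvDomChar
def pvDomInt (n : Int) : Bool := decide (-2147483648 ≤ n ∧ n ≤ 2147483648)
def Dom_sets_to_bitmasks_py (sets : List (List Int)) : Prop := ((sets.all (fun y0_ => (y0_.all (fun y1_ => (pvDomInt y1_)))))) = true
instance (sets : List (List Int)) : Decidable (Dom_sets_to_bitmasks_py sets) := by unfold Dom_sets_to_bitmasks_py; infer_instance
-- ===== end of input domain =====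

-- B transposes the mask-building pass (column-major: per sorted node, OR its bit into every
-- containing set, filling node2idx in the same single enumeration); same values, no speed claim.

-- ===== PORT A =====
-- shared first lines of both Pythons: all_nodes = set(); for s in sets: all_nodes |= set(s)
def pvAllNodes (sets : List (List Int)) : PySem.Set Int :=
  sets.foldl (fun acc s => PySem.Set.union acc (PySem.Set.ofList s)) PySem.Set.empty

-- 1 << i  (shift amounts here are dict/enumerate indices, always ≥ 0)
def pvBit (k : Nat) : Int := 1 <<< k

def sets_to_bitmasks_py (sets : List (List Int)) : List Int × (List (Int × Int)) :=
  -- node2idx = {node: i for i, node in enumerate(sorted(all_nodes))}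
  let node2idx : PySem.Dict Int Int :=
    (PySem.List.enumerate (PySem.List.sorted (pvAllNodes sets) (fun x => x) false)).foldl
      (fun d p => d.insert p.2 p.1) PySem.Dict.empty
  -- for s in sets: mask = 0; for v in s: mask |= 1 << node2idx[v]; bitmasks.append(mask)
  -- (iterating the Python set s in list order is exact: | is commutative/idempotent;
  --  node2idx[v] is always present — v ∈ union — so getD/.toNat are exact, no KeyError)
  let bitmasks : List Int :=
    sets.foldl (fun bs s =>
      bs ++ [s.foldl (fun mask v => PySem.Int.bor mask (pvBit (node2idx.getD v 0).toNat)) 0]) []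
  (bitmasks, node2idx.items)

-- ===== PORT B =====
def sets_to_bitmasks_py_alt (sets : List (List Int)) : List Int × (List (Int × Int)) :=
  -- bitmasks = [0]*len(sets)
  -- for i, node in enumerate(sorted(all_nodes)):
  --   node2idx[node] = i; bit = 1 << i
  --   for j, s in enumerate(sets): if node in s: bitmasks[j] |= bit     (the positional
  --   update of bitmasks[j] against the parallel list sets is the zipWith below)
  let fin :=
    (PySem.List.enumerate (PySem.List.sorted (pvAllNodes sets) (fun x => x) false)).foldl
      (fun (st : PySem.Dict Int Int × List Int) p =>
        (st.1.insert p.2 p.1,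
         List.zipWith (fun m s => if p.2 ∈ s then PySem.Int.bor m (pvBit p.1.toNat) else m) st.2 sets))
      (PySem.Dict.empty, List.replicate sets.length 0)
  (fin.2, fin.1.items)

-- ===== PRECONDITION & SPEC =====
def Spec_sets_to_bitmasks_py (sets : List (List Int)) (out : List Int × (List (Int × Int))) : Prop := out = sets_to_bitmasks_py_alt sets
instance (sets : List (List Int)) (out : List Int × (List (Int × Int))) : Decidable (Spec_sets_to_bitmasks_py sets out) := by unfold Spec_sets_to_bitmasks_py; infer_instance

-- ===== CLAIM (what is proved, stated in full; the proofs are below) =====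
def Claim_equal_sets_to_bitmasks_py : Prop := ∀ (sets : List (List Int)), Dom_sets_to_bitmasks_py sets → Spec_sets_to_bitmasks_py sets (sets_to_bitmasks_py sets)

-- ===== LEMMAS AND PROOFS =====

theorem pv_foldl_union_nodup (sets : List (List Int)) (acc : PySem.Set Int) (h : acc.Nodup) :
    (sets.foldl (fun acc s => PySem.Set.union acc (PySem.Set.ofList s)) acc).Nodup := by
  induction sets generalizing acc with
  | nil => exact h
  | cons s t ih => exact ih _ (PySem.Set.nodup_union _ _ h)

theorem pv_mem_foldl_union (sets : List (List Int)) (acc : PySem.Set Int) (v : Int) :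
    v ∈ sets.foldl (fun acc s => PySem.Set.union acc (PySem.Set.ofList s)) acc ↔
      v ∈ acc ∨ ∃ s ∈ sets, v ∈ s := by
  induction sets generalizing acc with
  | nil => simp
  | cons s t ih =>
    simp [List.foldl, ih, PySem.Set.mem_union, PySem.Set.mem_ofList]
    tauto

theorem pv_univ_nodup (sets : List (List Int)) :
    (PySem.List.sorted (pvAllNodes sets) (fun x => x) false).Nodup :=
  ((PySem.List.sorted_perm _ _ _).nodup_iff).mpr
    (pv_foldl_union_nodup sets _ List.nodup_nil)

theorem pv_items (univ : List Int) (hnd : univ.Nodup) :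
    ((PySem.List.enumerate univ).foldl (fun (d : PySem.Dict Int Int) p => d.insert p.2 p.1)
      PySem.Dict.empty).items = (PySem.List.enumerate univ).map (fun p => (p.2, p.1)) := by
  rw [PySem.Dict.items_foldl_insert_fresh]
  · rfl
  · intro a ha; simp [PySem.Dict.contains_empty]
  · rw [PySem.List.map_snd_enumerate]; exact hnd

theorem pv_getD_univ (univ : List Int) (hnd : univ.Nodup) (k : Nat) (hk : k < univ.length) :
    ((PySem.List.enumerate univ).foldl (fun (d : PySem.Dict Int Int) p => d.insert p.2 p.1)
      PySem.Dict.empty).getD univ[k] 0 = (k : Int) := by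
  apply PySem.Dict.getD_of_mem_items
  · rw [pv_items univ hnd]
    refine List.mem_map.mpr ⟨((k : Int), univ[k]), ?_, rfl⟩
    rw [PySem.List.mem_enumerate_iff]
    exact ⟨k, hk, by simp⟩
  · show (_ : PySem.Dict Int Int).items.map Prod.fst |>.Nodup
    rw [pv_items univ hnd]
    rw [List.map_map]
    show (List.map (fun p => p.2) (PySem.List.enumerate univ)).Nodup
    rw [PySem.List.map_snd_enumerate]
    exact hnd

-- fold of appended singletons is a map
theorem pv_foldl_append_map (sets : List (List Int)) (f : List Int → Int) (acc : List Int) :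
    sets.foldl (fun bs s => bs ++ [f s]) acc = acc ++ sets.map f := by
  induction sets generalizing acc with
  | nil => simp
  | cons s t ih => simp [List.foldl, ih]

theorem pv_zip_map (sets : List (List Int)) (f : Int → List Int → Int) (g : List Int → Int) :
    List.zipWith (fun m s => f m s) (sets.map g) sets = sets.map (fun s => f (g s) s) := by
  rw [List.zipWith_map_left]
  induction sets with
  | nil => rfl
  | cons s t ih => simp [List.zipWith]

-- B's zipWith fold over a map-shaped state stays map-shaped
theorem pv_foldl_zipWith (L : List (Int × Int)) (sets : List (List Int)) (g : List Int → Int) :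
    L.foldl (fun ms p =>
        List.zipWith (fun m s => if p.2 ∈ s then PySem.Int.bor m (pvBit p.1.toNat) else m) ms sets)
      (sets.map g)
    = sets.map (fun s => L.foldl
        (fun m p => if p.2 ∈ s then PySem.Int.bor m (pvBit p.1.toNat) else m) (g s)) := by
  induction L generalizing g with
  | nil => simp
  | cons p t ih =>
    simp only [List.foldl]
    rw [pv_zip_map sets _ g, ih]

theorem pv_cast_foldA (l : List Int) (f : Int → Nat) (a : Nat) :
    l.foldl (fun m v => PySem.Int.bor m (pvBit (f v))) (a : Int)
      = ((l.foldl (fun m v => m ||| (1 <<< f v)) a : Nat) : Int) := by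
  induction l generalizing a with
  | nil => rfl
  | cons x t ih =>
    simp only [List.foldl]
    rw [show (pvBit (f x)) = ((1 <<< f x : Nat) : Int) by simp [pvBit],
        PySem.Int.bor_natCast, ih]

theorem pv_cast_foldB {α : Type} (l : List α) (P : α → Prop) [DecidablePred P] (g : α → Nat) (a : Nat) :
    l.foldl (fun m p => if P p then PySem.Int.bor m (pvBit (g p)) else m) (a : Int)
      = ((l.foldl (fun m p => if P p then m ||| (1 <<< g p) else m) a : Nat) : Int) := by
  induction l generalizing a with
  | nil => rfl
  | cons x t ih =>
    simp only [List.foldl]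
    by_cases h : P x
    · rw [if_pos h, if_pos h, show (pvBit (g x)) = ((1 <<< g x : Nat) : Int) by simp [pvBit],
          PySem.Int.bor_natCast, ih]
    · rw [if_neg h, if_neg h, ih]

theorem pv_testBit_foldl_or {α : Type} (l : List α) (f : α → Nat) (a : Nat) (k : Nat) :
    (l.foldl (fun m x => m ||| f x) a).testBit k = (a.testBit k || l.any fun x => (f x).testBit k) := by
  induction l generalizing a with
  | nil => simp
  | cons x t ih => simp [List.foldl, ih, Nat.testBit_or, Bool.or_assoc]

theorem pv_if_or (c : Prop) [Decidable c] (m b : Nat) :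
    (if c then m ||| b else m) = m ||| (if c then b else 0) := by
  split_ifs <;> simp

-- per-set equality of A's row-major and B's column-major mask computation
theorem pv_mask_eq (univ : List Int) (hnd : univ.Nodup) (s : List Int)
    (hsub : ∀ v ∈ s, v ∈ univ) :
    s.foldl (fun mask v => PySem.Int.bor mask (pvBit
        (((PySem.List.enumerate univ).foldl (fun (d : PySem.Dict Int Int) p => d.insert p.2 p.1)
          PySem.Dict.empty).getD v 0).toNat)) 0
    = (PySem.List.enumerate univ).foldl
        (fun m p => if p.2 ∈ s then PySem.Int.bor m (pvBit p.1.toNat) else m) 0 := by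
  have hstep : s.foldl (fun mask v => PySem.Int.bor mask (pvBit
        (((PySem.List.enumerate univ).foldl (fun (d : PySem.Dict Int Int) p => d.insert p.2 p.1)
          PySem.Dict.empty).getD v 0).toNat)) 0
      = s.foldl (fun mask v => PySem.Int.bor mask (pvBit (univ.idxOf v))) 0 := by
    apply PySem.List.foldl_congr_mem
    intro acc v hv
    have hvu : v ∈ univ := hsub v hv
    have hlt : univ.idxOf v < univ.length := List.idxOf_lt_length_of_mem hvu
    have := pv_getD_univ univ hnd (univ.idxOf v) hlt
    rw [List.getElem_idxOf] at this
    rw [this, Int.toNat_natCast]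
  rw [hstep]
  have hA := pv_cast_foldA s (fun v => univ.idxOf v) 0
  have hB := pv_cast_foldB (PySem.List.enumerate univ) (fun p => p.2 ∈ s) (fun p => p.1.toNat) 0
  rw [show ((0:Nat) : Int) = (0 : Int) from rfl] at hA hB
  rw [hA, hB]
  congr 1
  apply Nat.eq_of_testBit_eq
  intro k
  rw [pv_testBit_foldl_or]
  have : (PySem.List.enumerate univ).foldl
      (fun m p => if p.2 ∈ s then m ||| (1 <<< p.1.toNat) else m) 0
      = (PySem.List.enumerate univ).foldl
      (fun m p => m ||| (if p.2 ∈ s then 1 <<< p.1.toNat else 0)) 0 := by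
    apply PySem.List.foldl_congr_mem
    intro acc p _; exact pv_if_or _ _ _
  rw [this, pv_testBit_foldl_or]
  simp only [Nat.zero_testBit, Bool.false_or]
  rw [Bool.eq_iff_iff]
  constructor
  · intro h
    rw [List.any_eq_true] at h ⊢
    obtain ⟨v, hv, hbit⟩ := h
    rw [Nat.one_shiftLeft, Nat.testBit_two_pow] at hbit
    have hk : univ.idxOf v = k := by simpa using hbit
    have hvu := hsub v hv
    have hlt : univ.idxOf v < univ.length := List.idxOf_lt_length_of_mem hvu
    refine ⟨((univ.idxOf v : Int), univ[univ.idxOf v]), ?_, ?_⟩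
    · rw [PySem.List.mem_enumerate_iff]
      exact ⟨univ.idxOf v, hlt, by simp⟩
    · rw [List.getElem_idxOf]
      simp only [if_pos hv, Int.toNat_natCast]
      rw [Nat.one_shiftLeft, Nat.testBit_two_pow]
      simp [hk]
  · intro h2
    rw [List.any_eq_true] at h2 ⊢
    obtain ⟨p, hp, hbit⟩ := h2
    rw [PySem.List.mem_enumerate_iff] at hp
    obtain ⟨j, hj, rfl⟩ := hp
    simp only [Int.zero_add] at hbit
    by_cases hm : univ[j] ∈ s
    · rw [if_pos hm, Nat.one_shiftLeft, Nat.testBit_two_pow] at hbit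
      have hk' : ((j:Int)).toNat = k := by simpa using hbit
      refine ⟨univ[j], hm, ?_⟩
      rw [Nat.one_shiftLeft, Nat.testBit_two_pow]
      have : univ.idxOf univ[j] = j := List.Nodup.idxOf_getElem hnd j hj
      simp [this]; omega
    · rw [if_neg hm] at hbit; simp at hbit

-- ===== VERDICT (by name: the statement is the Claim_ definition above) =====
theorem sets_to_bitmasks_py_spec : Claim_equal_sets_to_bitmasks_py := by
  intro sets _
  unfold Spec_sets_to_bitmasks_py sets_to_bitmasks_py sets_to_bitmasks_py_alt
  simp only []
  rw [PySem.List.foldl_prod_mk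
      (f := fun (d : PySem.Dict Int Int) (p : Int × Int) => d.insert p.2 p.1)
      (g := fun (ms : List Int) (p : Int × Int) =>
        List.zipWith (fun m s => if p.2 ∈ s then PySem.Int.bor m (pvBit p.1.toNat) else m) ms sets)]
  refine Prod.ext ?_ rfl
  show _ = (PySem.List.enumerate _).foldl _ (List.replicate sets.length 0)
  rw [pv_foldl_append_map, List.nil_append,
      show (List.replicate sets.length (0:Int)) = sets.map (fun _ => 0) by
        rw [List.map_const'],
      pv_foldl_zipWith]
  apply List.map_congr_left
  intro s hs
  exact pv_mask_eq _ (pv_univ_nodup sets) s (fun v hv =>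
    (PySem.List.mem_sorted _ _ _ _).mpr
      ((pv_mem_foldl_union sets PySem.Set.empty v).mpr (Or.inr ⟨s, hs, hv⟩)))
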